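-- pv_equiv track=rewrite | github.com/BartoszKruszewski/courses-uwr | Kurs Programowania w Pythonie/lista 11/zad 2.py | pnf
-- ===== SOURCE A (Python) =====
-- def pnf(word):
--     assignments = {}
--     i = 1
--     for letter in word:
--         if not letter in assignments:
--             assignments[letter] = i
--             i += 1
--     result = ""
--     for letter in word:
--         result += str(assignments[letter]) + "-"
--     return result[:-1]
-- ===== SOURCE B (Python) =====
-- def pnf(word):
--     return "-".join(str(len(set(word[:word.find(c) + 1]))) for c in word)
-- ===== Notes on version B (the rewrite author's own statement) =====
-- stated objective: alternative
-- what changed: Replaces A's stateful counter-dict numbering plus a second rescan-and-strip pass by a stateless per-character closed form: each letter's number is the count of distinct letters in the prefix of word up to and including that letter's first occurrence (len(set(word[:word.find(c)+1]))), joined directly; no dict, no counter, no trailing-dash stripping.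
import Mathlib
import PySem

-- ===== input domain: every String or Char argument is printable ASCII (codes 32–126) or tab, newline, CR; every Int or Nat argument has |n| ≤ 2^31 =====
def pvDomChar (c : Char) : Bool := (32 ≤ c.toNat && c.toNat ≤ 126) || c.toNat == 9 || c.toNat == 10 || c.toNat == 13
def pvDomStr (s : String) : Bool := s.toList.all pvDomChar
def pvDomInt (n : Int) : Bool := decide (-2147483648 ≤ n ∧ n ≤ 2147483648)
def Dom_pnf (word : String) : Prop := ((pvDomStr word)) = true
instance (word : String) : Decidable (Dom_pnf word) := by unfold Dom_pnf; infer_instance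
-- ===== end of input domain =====

-- B replaces A's counter-dict numbering plus second rescan-and-strip pass by a stateless
-- per-character closed form (distinct-count of the prefix up to the letter's first occurrence),
-- joined directly; alternative decomposition, same results.

-- ===== PORT A =====
-- first loop: assignments, i — assign a fresh number to each unseen letter
def pnfAssign : List Char → PySem.Dict Char Int → Int → PySem.Dict Char Int
  | [], d, _ => d
  | c :: cs, d, i =>
    if d.contains c then pnfAssign cs d i
    else pnfAssign cs (d.insert c i) (i + 1)

def pnf (word : String) : String :=
  let assignments := pnfAssign word.toList PySem.Dict.empty 1
  -- second loop: result += str(assignments[letter]) + "-"  (the lookup never misses: every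
  -- letter of word was inserted by the first loop, so getD's default is never reached)
  let result := word.toList.foldl
    (fun r c => r ++ PySem.Int.toChars (assignments.getD c 0) ++ ['-']) []
  String.ofList (PySem.List.slice result none (some (-1)))   -- result[:-1]

-- ===== PORT B =====
-- "-".join(str(len(set(word[:word.find(c) + 1]))) for c in word)
def pnf_alt (word : String) : String :=
  String.ofList (PySem.Chars.join ['-'] (word.toList.map (fun c =>
    PySem.Int.toChars
      (((PySem.Set.ofList (PySem.List.slice word.toList none
          (some (PySem.Chars.find word.toList [c] + 1)))).length : Int)))))

-- ===== PRECONDITION & SPEC =====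
def Spec_pnf (word : String) (out : String) : Prop := out = pnf_alt word
instance (word : String) (out : String) : Decidable (Spec_pnf word out) := by
  unfold Spec_pnf; infer_instance

-- ===== CLAIM (what is proved, stated in full; the proofs are below) =====
def Claim_equal_pnf : Prop := ∀ (word : String), Dom_pnf word → Spec_pnf word (pnf word)

-- ===== LEMMAS AND PROOFS =====

-- a singleton is a prefix exactly of lists starting with that element
theorem singleton_prefix_iff (c : Char) (l : List Char) : [c] <+: l ↔ l.head? = some c := by
  constructor
  · rintro ⟨t, rfl⟩; rfl
  · intro h; cases l with
    | nil => simp at h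
    | cons a t => simp at h; subst h; exact ⟨t, rfl⟩

-- word.find(c) for a letter c of word is its first-occurrence index
theorem find_single_eq_idxOf (ws : List Char) (c : Char) (h : c ∈ ws) :
    PySem.Chars.find ws [c] = (ws.idxOf c : Int) := by
  have hk : ws.idxOf c < ws.length := List.idxOf_lt_length_of_mem h
  have hpre : ∀ i : Nat, ([c] <+: ws.drop i ↔ ws[i]? = some c) := by
    intro i; rw [singleton_prefix_iff, List.head?_drop]
  have hprek : [c] <+: ws.drop (ws.idxOf c) :=
    (hpre _).mpr (by rw [List.getElem?_eq_getElem hk, List.getElem_idxOf hk])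
  have hnn : 0 ≤ PySem.Chars.find ws [c] := by
    rw [PySem.Chars.find_nonneg_iff, ← PySem.Chars.isIn_iff_infix,
      ← PySem.Chars.exists_prefix_drop_iff_isIn]
    exact ⟨_, hprek⟩
  obtain ⟨hfpre, hfmin⟩ := PySem.Chars.find_spec (s := ws) (sub := [c]) hnn
  have hle : (PySem.Chars.find ws [c]).toNat ≤ ws.idxOf c := by
    by_contra hlt
    exact hfmin (ws.idxOf c) (by omega) hprek
  have hge : ws.idxOf c ≤ (PySem.Chars.find ws [c]).toNat := by
    have hgc : ws[(PySem.Chars.find ws [c]).toNat]? = some c := (hpre _).mp hfpre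
    rw [List.getElem?_eq_some_iff] at hgc
    obtain ⟨hfl, hval⟩ := hgc
    by_contra hlt
    have hmem : c ∈ ws.take (ws.idxOf c) := by
      refine List.mem_iff_getElem.mpr ⟨(PySem.Chars.find ws [c]).toNat, by
        rw [List.length_take]; omega, ?_⟩
      rw [List.getElem_take]; exact hval
    rw [List.mem_take_iff_idxOf_lt h] at hmem
    omega
  omega

-- A's dict after the first loop: x ↦ (rank of x in the first-occurrence dedup of what was scanned) + 1
theorem pnfAssign_get? (cs : List Char) (d : PySem.Dict Char Int) (s : PySem.Set Char)
    (hnd : s.Nodup)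
    (hinv : ∀ x, d.get? x = if x ∈ s then some ((s.idxOf x : Int) + 1) else none) :
    ∀ x, (pnfAssign cs d ((s.length : Int) + 1)).get? x =
      (if x ∈ cs.foldl PySem.Set.add s then
        some (((cs.foldl PySem.Set.add s).idxOf x : Int) + 1) else none) := by
  induction cs generalizing d s with
  | nil => intro x; simpa [pnfAssign] using hinv x
  | cons c cs ih =>
    by_cases hm : c ∈ s
    · have hc : d.contains c = true := by
        rw [PySem.Dict.contains_eq_isSome_get?, hinv c, if_pos hm]; rfl
      intro x
      rw [show ((c :: cs).foldl PySem.Set.add s) = cs.foldl PySem.Set.add s by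
        rw [List.foldl_cons, PySem.Set.add_of_mem hm]]
      simpa [pnfAssign, hc] using ih d s hnd hinv x
    · have hc : d.contains c = false := by
        rw [PySem.Dict.contains_eq_isSome_get?, hinv c, if_neg hm]; rfl
      have hnd' : (s ++ [c]).Nodup := by
        refine hnd.append (List.nodup_singleton c) ?_
        intro a ha hc'
        rw [List.mem_singleton] at hc'
        subst hc'; exact hm ha
      have hinv' : ∀ x, (d.insert c ((s.length : Int) + 1)).get? x =
          if x ∈ s ++ [c] then some (((s ++ [c]).idxOf x : Int) + 1) else none := by
        intro x
        rcases eq_or_ne x c with rfl | hne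
        · rw [PySem.Dict.get?_insert_self, if_pos (by simp),
            List.idxOf_append, if_neg hm]
          simp
        · rw [PySem.Dict.get?_insert_of_ne _ _ hne, hinv x]
          by_cases hxs : x ∈ s
          · rw [if_pos hxs, if_pos (by simp [hxs]), List.idxOf_append_of_mem hxs]
          · rw [if_neg hxs, if_neg (by simp [hxs, hne])]
      intro x
      have hstep : ((c :: cs).foldl PySem.Set.add s) = cs.foldl PySem.Set.add (s ++ [c]) := by
        rw [List.foldl_cons, PySem.Set.add_of_not_mem hm]
      rw [hstep]
      have hfin := ih (d.insert c ((s.length : Int) + 1)) (s ++ [c]) hnd' hinv' x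
      rw [show ((s ++ [c]).length : Int) + 1 = ((s.length : Int) + 1) + 1 by
        rw [show (s ++ [c]).length = s.length + 1 from by simp]; push_cast; ring] at hfin
      simpa [pnfAssign, hc] using hfin

-- B's number for a letter c of ws, in terms of the dedup rank
theorem prefix_distinct_count (ws : List Char) (c : Char) (h : c ∈ ws) :
    ((PySem.Set.ofList (ws.take (ws.idxOf c + 1))).length : Int) =
      ((PySem.Set.ofList ws).idxOf c : Int) + 1 := by
  have hk : ws.idxOf c < ws.length := List.idxOf_lt_length_of_mem h
  have htake : ws.take (ws.idxOf c + 1) = ws.take (ws.idxOf c) ++ [c] := by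
    rw [List.take_add_one, List.getElem?_eq_getElem hk, List.getElem_idxOf hk]; rfl
  have hcnot : c ∉ ws.take (ws.idxOf c) := by
    rw [List.mem_take_iff_idxOf_lt h]; omega
  have hcnot' : c ∉ PySem.Set.ofList (ws.take (ws.idxOf c)) := by
    rw [PySem.Set.mem_ofList]; exact hcnot
  have hof : PySem.Set.ofList (ws.take (ws.idxOf c + 1)) =
      PySem.Set.ofList (ws.take (ws.idxOf c)) ++ [c] := by
    rw [htake, PySem.Set.ofList_append_singleton, PySem.Set.add_of_not_mem hcnot']
  have hsplit : PySem.Set.ofList ws =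
      PySem.Set.ofList (ws.take (ws.idxOf c + 1)) ++
        (PySem.Set.ofList (ws.drop (ws.idxOf c + 1))).filter
          (fun y => !(PySem.Set.contains (PySem.Set.ofList (ws.take (ws.idxOf c + 1))) y)) := by
    conv_lhs => rw [← List.take_append_drop (ws.idxOf c + 1) ws]
    rw [PySem.Set.ofList_append, PySem.Set.update_eq_append_filter]
  have hidx : (PySem.Set.ofList ws).idxOf c =
      (PySem.Set.ofList (ws.take (ws.idxOf c))).length := by
    rw [hsplit, hof, List.append_assoc, List.idxOf_append, if_neg hcnot']
    simp
  rw [hof, hidx]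
  simp

-- stripping the trailing '-' from the dash-terminated chunks is exactly '-'.join of the parts
theorem dropLast_flatMap_dash (parts : List (List Char)) :
    (parts.flatMap (fun p => p ++ ['-'])).dropLast = PySem.Chars.join ['-'] parts := by
  induction parts with
  | nil => simp [PySem.Chars.join, List.intercalate]
  | cons p rest ih =>
    cases rest with
    | nil => simp [PySem.Chars.join, List.intercalate]
    | cons q rs =>
      rw [PySem.Chars.join_cons_cons]
      have hne : ((q :: rs).flatMap (fun p => p ++ ['-'])) ≠ [] := by
        simp [List.flatMap_cons]
      rw [List.flatMap_cons, List.append_assoc,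
        List.dropLast_append_of_ne_nil (by simp : ['-'] ++ (q :: rs).flatMap (fun p => p ++ ['-']) ≠ []),
        List.dropLast_append_of_ne_nil hne, ih]
      simp

-- the two per-letter numbers agree on every letter of the word
theorem numbers_agree (ws : List Char) (c : Char) (h : c ∈ ws) :
    (pnfAssign ws PySem.Dict.empty 1).getD c 0 =
      ((PySem.Set.ofList (PySem.List.slice ws none
          (some (PySem.Chars.find ws [c] + 1)))).length : Int) := by
  rw [find_single_eq_idxOf ws c h,
    show (ws.idxOf c : Int) + 1 = ((ws.idxOf c + 1 : Nat) : Int) by push_cast; ring,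
    PySem.List.slice_to ws (by positivity), Int.toNat_natCast,
    prefix_distinct_count ws c h]
  have hget := pnfAssign_get? ws PySem.Dict.empty ([] : PySem.Set Char)
    List.nodup_nil (fun x => by simp [PySem.Dict.get?_empty]) c
  rw [show ((([] : PySem.Set Char).length : Int) + 1) = (1 : Int) by simp] at hget
  rw [← PySem.Set.ofList_eq_foldl] at hget
  rw [PySem.Dict.getD_eq_get?_getD, hget, if_pos (show c ∈ PySem.Set.ofList ws by simp [PySem.Set.mem_ofList, h])]
  rfl

-- ===== VERDICT (by name: the statement is the Claim_ definition above) =====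
theorem pnf_spec : Claim_equal_pnf := by
  intro word _
  unfold Spec_pnf pnf pnf_alt
  simp only [List.append_assoc]
  rw [PySem.List.foldl_append_eq_flatMap
    (fun c => PySem.Int.toChars ((pnfAssign word.toList PySem.Dict.empty 1).getD c 0) ++ ['-'])]
  rw [PySem.List.slice_to_neg_one]
  rw [List.nil_append,
    show (word.toList.flatMap
      (fun c => PySem.Int.toChars ((pnfAssign word.toList PySem.Dict.empty 1).getD c 0) ++ ['-']))
      = ((word.toList.map
        (fun c => PySem.Int.toChars ((pnfAssign word.toList PySem.Dict.empty 1).getD c 0))).flatMap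
          (fun p => p ++ ['-'])) from
      (List.flatMap_map (f := fun c => PySem.Int.toChars
          ((pnfAssign word.toList PySem.Dict.empty 1).getD c 0))
        (g := fun p => p ++ ['-']) (l := word.toList)).symm,
    dropLast_flatMap_dash]
  have : (word.toList.map
      (fun c => PySem.Int.toChars ((pnfAssign word.toList PySem.Dict.empty 1).getD c 0)))
      = (word.toList.map (fun c =>
        PySem.Int.toChars
          (((PySem.Set.ofList (PySem.List.slice word.toList none
              (some (PySem.Chars.find word.toList [c] + 1)))).length : Int)))) :=
    List.map_congr_left (fun c hc => by rw [numbers_agree word.toList c hc])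
  rw [this]
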